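-- pv_equiv track=rewrite | github.com/danenbm/advent-of-code-2022 | day_7/part_2/dir_sizes.py | sum_dirs
-- ===== SOURCE A (Python) =====
-- def sum_dirs(dirs, initial_key, current_choice=None, additional_needed=None):
--     dir_sum = 0
--     for key in dirs[initial_key]:
--         if key.isnumeric():
--             dir_sum += int(key)
--         else:
--             (current_choice, subdir_sum) = sum_dirs(dirs,
--                                                     key,
--                                                     current_choice,
--                                                     additional_needed)
--             dir_sum += subdir_sum
--
--     if additional_needed is not None and dir_sum >= additional_needed:
--         if current_choice is None or dir_sum < current_choice:
--             current_choice = dir_sum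
--     return (current_choice, dir_sum)
-- ===== SOURCE B (Python) =====
-- def sum_dirs(dirs, initial_key, current_choice=None, additional_needed=None):
--     # Two-pass decomposition: first collect every directory's total size in
--     # post-order, then scan the collected sizes once for the best choice.
--     sizes = []
--
--     def size(key):
--         total = 0
--         for child in dirs[key]:
--             if child.isnumeric():
--                 total += int(child)
--             else:
--                 total += size(child)
--         sizes.append(total)
--         return total
--
--     root = size(initial_key)
--     choice = current_choice
--     if additional_needed is not None:
--         for s in sizes:
--             if s >= additional_needed and (choice is None or s < choice):
--                 choice = s
--     return (choice, root)
-- ===== Notes on version B (the rewrite author's own statement) =====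
-- stated objective: alternative
-- what changed: B replaces A's threading of the running minimum current_choice through the recursion by a two-pass decomposition: a recursive helper computes only directory sizes while collecting every directory's total in post-order, then a single scan over the collected sizes picks the smallest one >= additional_needed (seeded with the passed-in current_choice).
import Mathlib
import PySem

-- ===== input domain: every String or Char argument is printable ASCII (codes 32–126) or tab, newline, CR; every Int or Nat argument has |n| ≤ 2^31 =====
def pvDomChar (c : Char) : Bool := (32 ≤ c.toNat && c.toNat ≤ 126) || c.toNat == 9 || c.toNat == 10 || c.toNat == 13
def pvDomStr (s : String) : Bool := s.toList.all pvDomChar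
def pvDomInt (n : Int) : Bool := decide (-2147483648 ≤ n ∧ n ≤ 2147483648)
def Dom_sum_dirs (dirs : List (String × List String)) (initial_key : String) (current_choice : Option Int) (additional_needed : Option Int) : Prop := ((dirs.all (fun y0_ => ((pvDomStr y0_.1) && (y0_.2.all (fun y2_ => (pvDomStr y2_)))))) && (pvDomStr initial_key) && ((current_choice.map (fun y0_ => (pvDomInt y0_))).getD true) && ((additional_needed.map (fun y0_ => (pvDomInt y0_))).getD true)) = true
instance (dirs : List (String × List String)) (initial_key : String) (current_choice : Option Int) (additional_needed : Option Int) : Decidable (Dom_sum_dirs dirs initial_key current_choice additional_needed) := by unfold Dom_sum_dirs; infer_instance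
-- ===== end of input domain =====

-- B replaces A's threading of the running minimum through the recursion by a two-pass
-- decomposition (collect all directory sizes in post-order, then scan once); objective: alternative.


-- ===== PORT A =====
-- dirs is a Python dict (assoc list, first-match lookup):
def pvLookup : List (String × List String) → String → Option (List String)
  | [], _ => none
  | (k, v) :: rest, key => if k == key then some v else pvLookup rest key

-- A's final if-block: maybe replace current_choice by dir_sum.
def updA : Option Int → Option Int → Int → Option Int
  | none, cc, _ => cc
  | some n, cc, s =>
      if s ≥ n then
        match cc with
        | none => some s
        | some c => if s < c then some s else some c
      else cc

-- Python's str.isnumeric coincides with str.isdigit on the printable-ASCII domain (Dom),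
-- so it is ported as PySem.Str.strIsdigit; int(key) is PySem.Int.ofStr? (some on all-digit
-- keys, so the .getD 0 default is never used when the branch is taken).
-- Fuel makes the recursion total; none = the Python raises (KeyError / unbounded recursion).
def sumDirsAux (dirs : List (String × List String)) : Nat → String → Option Int → Option Int → Option (Option Int × Int)
  | 0, _, _, _ => none
  | fuel + 1, key0, cc0, needed =>
    (pvLookup dirs key0).bind fun children =>
      (children.foldl
        (fun acc key =>
          acc.bind fun st =>
            if PySem.Str.strIsdigit key then
              some (st.1, st.2 + (PySem.Int.ofStr? key).getD 0)
            else
              (sumDirsAux dirs fuel key st.1 needed).map fun r => (r.1, st.2 + r.2))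
        (some (cc0, (0 : Int)))).map fun st => (updA needed st.1 st.2, st.2)

def sum_dirs (dirs : List (String × List String)) (initial_key : String) (current_choice : Option Int) (additional_needed : Option Int) : Option Int × Int :=
  (sumDirsAux dirs (dirs.length + 1) initial_key current_choice additional_needed).getD (current_choice, 0)

-- ===== PORT B =====
-- B's inner helper `size`: returns (total size of key, the sizes appended to `sizes`
-- during this call, in post-order).  Fuel/none exactly as in port A.
def sizesB (dirs : List (String × List String)) : Nat → String → Option (Int × List Int)
  | 0, _ => none
  | fuel + 1, key0 =>
    (pvLookup dirs key0).bind fun children =>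
      (children.foldl
        (fun acc child =>
          acc.bind fun st =>
            if PySem.Str.strIsdigit child then
              some (st.1 + (PySem.Int.ofStr? child).getD 0, st.2)
            else
              (sizesB dirs fuel child).map fun r => (st.1 + r.1, st.2 ++ r.2))
        (some ((0 : Int), ([] : List Int)))).map fun st => (st.1, st.2 ++ [st.1])

def sum_dirs_alt (dirs : List (String × List String)) (initial_key : String) (current_choice : Option Int) (additional_needed : Option Int) : Option Int × Int :=
  match sizesB dirs (dirs.length + 1) initial_key with
  | none => (current_choice, 0)
  | some (root, sizes) =>
    let choice :=
      match additional_needed with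
      | none => current_choice
      | some n =>
        sizes.foldl
          (fun ch s => if decide (s ≥ n) && ch.elim true (fun c => decide (s < c)) then some s else ch)
          current_choice
    (choice, root)

-- ===== PRECONDITION & SPEC =====
-- the subdirectory names listed under k (numeric entries are file sizes, not names):
def pvKids (dirs : List (String × List String)) (k : String) : List String :=
  -- an all-digit entry such as "10" is a file size, not a subdirectory name
  ((pvLookup dirs k).getD []).filter (fun c => !PySem.Str.strIsdigit c)

-- one expansion step of the set of directory names reachable from `start`:
def pvStep (dirs : List (String × List String)) (s : List String) : List String :=
  PySem.List.dedup (s ++ s.flatMap (pvKids dirs))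

-- all directory names reachable from `start` (the closure is stable after ≤ dirs.length steps):
def pvReach (dirs : List (String × List String)) (start : List String) : List String :=
  (pvStep dirs)^[dirs.length + 1] start

-- Pre_ is exactly the inputs on which the Python A returns: keys are distinct (true of every
-- Python dict), every directory name reachable from initial_key is a key of dirs (else KeyError)
-- and no reachable directory can reach itself again (else unbounded recursion, RecursionError).
def Pre_sum_dirs (dirs : List (String × List String)) (initial_key : String) (_current_choice : Option Int) (_additional_needed : Option Int) : Prop :=
  (dirs.map Prod.fst).Nodup ∧
    ∀ k ∈ pvReach dirs [initial_key], k ∈ dirs.map Prod.fst ∧ k ∉ pvReach dirs (pvKids dirs k)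
instance (dirs : List (String × List String)) (initial_key : String) (current_choice : Option Int) (additional_needed : Option Int) : Decidable (Pre_sum_dirs dirs initial_key current_choice additional_needed) := by unfold Pre_sum_dirs; infer_instance

def pvWitness_sum_dirs : (List (String × List String)) × String × Option Int × Option Int :=
  ([("a", ["10", "b"]), ("b", ["5"])], "a", none, some 3)

def Spec_sum_dirs (dirs : List (String × List String)) (initial_key : String) (current_choice : Option Int) (additional_needed : Option Int) (out : Option Int × Int) : Prop := out = sum_dirs_alt dirs initial_key current_choice additional_needed
instance (dirs : List (String × List String)) (initial_key : String) (current_choice : Option Int) (additional_needed : Option Int) (out : Option Int × Int) : Decidable (Spec_sum_dirs dirs initial_key current_choice additional_needed out) := by unfold Spec_sum_dirs; infer_instance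

-- ===== CLAIM (what is proved, stated in full; the proofs are below) =====
def Claim_equal_sum_dirs : Prop := ∀ (dirs : List (String × List String)) (initial_key : String) (current_choice : Option Int) (additional_needed : Option Int), Dom_sum_dirs dirs initial_key current_choice additional_needed → Pre_sum_dirs dirs initial_key current_choice additional_needed → Spec_sum_dirs dirs initial_key current_choice additional_needed (sum_dirs dirs initial_key current_choice additional_needed)

-- ===== LEMMAS AND PROOFS =====

-- the two fold step functions, named so the `none` lemma applies to both
def stepA (dirs : List (String × List String)) (fuel : Nat) (needed : Option Int)
    (acc : Option (Option Int × Int)) (key : String) : Option (Option Int × Int) :=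
  acc.bind fun st =>
    if PySem.Str.strIsdigit key then
      some (st.1, st.2 + (PySem.Int.ofStr? key).getD 0)
    else
      (sumDirsAux dirs fuel key st.1 needed).map fun r => (r.1, st.2 + r.2)

def stepB (dirs : List (String × List String)) (fuel : Nat)
    (acc : Option (Int × List Int)) (child : String) : Option (Int × List Int) :=
  acc.bind fun st =>
    if PySem.Str.strIsdigit child then
      some (st.1 + (PySem.Int.ofStr? child).getD 0, st.2)
    else
      (sizesB dirs fuel child).map fun r => (st.1 + r.1, st.2 ++ r.2)

theorem foldl_stepA_none (dirs : List (String × List String)) (fuel : Nat) (needed : Option Int)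
    (l : List String) : l.foldl (stepA dirs fuel needed) none = none := by
  induction l with
  | nil => rfl
  | cons c t ih => simpa [stepA] using ih

theorem foldl_stepB_none (dirs : List (String × List String)) (fuel : Nat)
    (l : List String) : l.foldl (stepB dirs fuel) none = none := by
  induction l with
  | nil => rfl
  | cons c t ih => simpa [stepB] using ih

theorem foldl_stepB_shift (dirs : List (String × List String)) (fuel : Nat) :
    ∀ (l : List String) (t : Int) (l0 : List Int),
      l.foldl (stepB dirs fuel) (some (t, l0)) =
        (l.foldl (stepB dirs fuel) (some (t, []))).map fun r => (r.1, l0 ++ r.2) := by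
  intro l
  induction l with
  | nil => intro t l0; simp
  | cons c tail ih =>
    intro t l0
    by_cases hd : PySem.Str.strIsdigit c
    · simp only [List.foldl_cons, stepB, Option.bind_some, hd, if_true]
      exact ih _ l0
    · simp only [List.foldl_cons, stepB, Option.bind_some, hd]
      cases h : sizesB dirs fuel c with
      | none => simp [foldl_stepB_none]
      | some r =>
        simp only [Option.map_some, Bool.false_eq_true, if_false, List.nil_append]
        rw [ih (t + r.1) (l0 ++ r.2), ih (t + r.1) r.2]
        cases tail.foldl (stepB dirs fuel) (some (t + r.1, [])) with
        | none => rfl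
        | some q => simp

theorem foldl_AB (dirs : List (String × List String)) (fuel : Nat) (needed : Option Int)
    (IH : ∀ key cc, sumDirsAux dirs fuel key cc needed =
        (sizesB dirs fuel key).map fun r => (r.2.foldl (updA needed) cc, r.1)) :
    ∀ (l : List String) (cc : Option Int) (s : Int),
      l.foldl (stepA dirs fuel needed) (some (cc, s)) =
        (l.foldl (stepB dirs fuel) (some (s, []))).map fun r => (r.2.foldl (updA needed) cc, r.1) := by
  intro l
  induction l with
  | nil => intro cc s; simp
  | cons c tail ih =>
    intro cc s
    by_cases hd : PySem.Str.strIsdigit c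
    · simp only [List.foldl_cons, stepA, stepB, Option.bind_some, hd, if_true]
      exact ih cc (s + (PySem.Int.ofStr? c).getD 0)
    · simp only [List.foldl_cons, stepA, stepB, Option.bind_some, hd, IH c cc]
      cases h : sizesB dirs fuel c with
      | none => simp [foldl_stepA_none, foldl_stepB_none]
      | some r =>
        simp only [Option.map_some, Bool.false_eq_true, if_false, List.nil_append]
        rw [ih (r.2.foldl (updA needed) cc) (s + r.1), foldl_stepB_shift dirs fuel tail (s + r.1) r.2]
        cases tail.foldl (stepB dirs fuel) (some (s + r.1, [])) with
        | none => rfl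
        | some q => simp [List.foldl_append]

theorem sumDirsAux_eq (dirs : List (String × List String)) (needed : Option Int) :
    ∀ (fuel : Nat) (key : String) (cc : Option Int),
      sumDirsAux dirs fuel key cc needed =
        (sizesB dirs fuel key).map fun r => (r.2.foldl (updA needed) cc, r.1) := by
  intro fuel
  induction fuel with
  | zero => intro key cc; rfl
  | succ fuel ih =>
    intro key cc
    show (pvLookup dirs key).bind _ = ((pvLookup dirs key).bind _).map _
    cases pvLookup dirs key with
    | none => rfl
    | some children =>
      simp only [Option.bind_some]
      have hA : ∀ acc, children.foldl
          (fun acc key =>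
            acc.bind fun st =>
              if PySem.Str.strIsdigit key then
                some (st.1, st.2 + (PySem.Int.ofStr? key).getD 0)
              else
                (sumDirsAux dirs fuel key st.1 needed).map fun r => (r.1, st.2 + r.2)) acc
          = children.foldl (stepA dirs fuel needed) acc := fun _ => rfl
      have hB : ∀ acc, children.foldl
          (fun acc child =>
            acc.bind fun st =>
              if PySem.Str.strIsdigit child then
                some (st.1 + (PySem.Int.ofStr? child).getD 0, st.2)
              else
                (sizesB dirs fuel child).map fun r => (st.1 + r.1, st.2 ++ r.2)) acc
          = children.foldl (stepB dirs fuel) acc := fun _ => rfl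
      rw [hA, hB, foldl_AB dirs fuel needed ih children cc 0]
      cases children.foldl (stepB dirs fuel) (some ((0 : Int), ([] : List Int))) with
      | none => rfl
      | some r => simp [List.foldl_append]

theorem foldl_updA_none (cc : Option Int) (l : List Int) :
    l.foldl (updA none) cc = cc := by
  induction l generalizing cc with
  | nil => rfl
  | cons x t ih => simpa [updA] using ih cc

theorem stepChoice_eq_updA (n : Int) :
    (fun (ch : Option Int) (s : Int) =>
        if decide (s ≥ n) && ch.elim true (fun c => decide (s < c)) then some s else ch)
      = updA (some n) := by
  funext ch s
  cases ch with
  | none => simp [updA]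
  | some c =>
    simp only [updA, Option.elim]
    by_cases h1 : s ≥ n
    · by_cases h2 : s < c <;> simp [h1, h2]
    · simp [h1]

-- ===== VERDICT (by name: the statement is the Claim_ definition above) =====
theorem sum_dirs_spec : Claim_equal_sum_dirs := by
  intro dirs initial_key current_choice additional_needed _ _
  unfold Spec_sum_dirs sum_dirs sum_dirs_alt
  rw [sumDirsAux_eq dirs additional_needed (dirs.length + 1) initial_key current_choice]
  cases h : sizesB dirs (dirs.length + 1) initial_key with
  | none => rfl
  | some r =>
    cases additional_needed with
    | none => simp [foldl_updA_none]
    | some n =>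
      obtain ⟨root, sizes⟩ := r
      simp only [Option.map_some, Option.getD_some]
      rw [stepChoice_eq_updA]
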